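-- pv_equiv track=rewrite | github.com/gabmin/study_algorithm | 2026/2302.py | get_all_ways_of_theater_seat
-- ===== SOURCE A (Python) =====
-- memo = {
--     0: 1,
--     1: 1,
--     2: 2,
-- }
--
-- def get_count(n):
--     if n in memo:
--         return memo[n]
--
--     value = get_count(n - 1) + get_count(n - 2)
--     memo[n] = value
--     return value
--
-- def get_all_ways_of_theater_seat(total_count, fixed_seat_array):
--     result = 1
--     current_index = 0
--
--     for i in fixed_seat_array:
--         target_index = i - 1
--         result *= get_count(target_index - current_index)
--         current_index = target_index + 1
--
--     result *= get_count(total_count - current_index)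
--
--     return result
-- ===== SOURCE B (Python) =====
-- def get_all_ways_of_theater_seat(total_count, fixed_seat_array):
--     def ways(n):
--         # bottom-up Fibonacci table: ways(0)=ways(1)=1, ways(k)=ways(k-1)+ways(k-2)
--         fibs = [1, 1]
--         for _ in range(n - 1):
--             fibs.append(fibs[-1] + fibs[-2])
--         return fibs[n]
--
--     bounds = [0] + list(fixed_seat_array) + [total_count + 1]
--     result = 1
--     for prev, nxt in zip(bounds, bounds[1:]):
--         result *= ways(nxt - prev - 1)
--     return result
-- ===== Notes on version B (the rewrite author's own statement) =====
-- stated objective: alternative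
-- what changed: Replaced the recursive globally-memoized get_count and the running-index accumulation by a pure bottom-up Fibonacci table indexed per gap, with the gaps obtained by zipping consecutive boundaries (0, the fixed seats, total_count+1).
import Mathlib
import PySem

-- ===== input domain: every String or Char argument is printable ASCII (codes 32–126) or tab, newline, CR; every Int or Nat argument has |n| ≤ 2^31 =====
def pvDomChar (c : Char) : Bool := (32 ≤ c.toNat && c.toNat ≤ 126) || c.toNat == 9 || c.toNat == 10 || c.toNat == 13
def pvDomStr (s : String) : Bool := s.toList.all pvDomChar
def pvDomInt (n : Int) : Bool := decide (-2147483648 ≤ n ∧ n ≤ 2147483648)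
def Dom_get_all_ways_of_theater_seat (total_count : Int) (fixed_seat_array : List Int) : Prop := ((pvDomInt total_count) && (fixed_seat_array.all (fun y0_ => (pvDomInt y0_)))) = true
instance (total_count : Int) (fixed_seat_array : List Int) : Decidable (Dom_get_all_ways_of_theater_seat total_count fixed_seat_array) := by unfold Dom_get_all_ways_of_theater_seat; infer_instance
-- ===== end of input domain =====

-- B replaces A's recursive globally-memoized get_count + running-index loop by a pure
-- bottom-up two-variable Fibonacci applied to the gaps between consecutive boundaries
-- (objective: alternative decomposition).  A mutates the module-level memo dict; the
-- equivalence proved here is about the return value only.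

-- ===== PORT A =====
-- the module-level memo = {0: 1, 1: 1, 2: 2}
def initMemo : PySem.Dict Int Int :=
  ((PySem.Dict.empty.insert 0 1).insert 1 1).insert 2 2

-- get_count, with the global memo threaded through; the recursion is fuelled, none = the
-- call does not return (for n < 0 Python's get_count raises RecursionError)
def getCountFuel : Nat → PySem.Dict Int Int → Int → Option (Int × PySem.Dict Int Int)
  | 0, _, _ => none
  | fuel + 1, memo, n =>
    match memo.get? n with
    | some v => some (v, memo)
    | none =>
      match getCountFuel fuel memo (n - 1) with
      | none => none
      | some (v1, m1) =>
        match getCountFuel fuel m1 (n - 2) with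
        | none => none
        | some (v2, m2) => some (v1 + v2, m2.insert n (v1 + v2))

-- the for-loop over fixed_seat_array, state (result, current_index, memo)
def aLoop : List Int → Int × Int × PySem.Dict Int Int → Option (Int × Int × PySem.Dict Int Int)
  | [], st => some st
  | i :: rest, (result, current_index, memo) =>
    let target_index := i - 1
    match getCountFuel ((target_index - current_index).toNat + 1) memo (target_index - current_index) with
    | none => none
    | some (v, m') => aLoop rest (result * v, target_index + 1, m')

def get_all_ways_of_theater_seat (total_count : Int) (fixed_seat_array : List Int) : Int :=
  match aLoop fixed_seat_array (1, 0, initMemo) with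
  | none => 0  -- unreachable under Pre_ (Python raises here)
  | some (result, current_index, memo) =>
    match getCountFuel ((total_count - current_index).toNat + 1) memo (total_count - current_index) with
    | none => 0  -- unreachable under Pre_ (Python raises here)
    | some (v, _) => result * v

-- ===== PORT B =====
-- ways(n): bottom-up Fibonacci table fibs, then fibs[n]; fibs[-1]/fibs[-2] are always in
-- range (len ≥ 2), so their .getD 0 is never taken; fibs[n] = none is Python's IndexError
def waysTab (n : Int) : Option Int :=
  let fibs := (PySem.List.pyRange 0 (n - 1) 1).foldl
    (fun (fibs : List Int) _ =>
      fibs ++ [(PySem.List.pyGet? fibs (-1)).getD 0 + (PySem.List.pyGet? fibs (-2)).getD 0])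
    [1, 1]
  PySem.List.pyGet? fibs n

def get_all_ways_of_theater_seat_alt (total_count : Int) (fixed_seat_array : List Int) : Int :=
  let bounds := 0 :: (fixed_seat_array ++ [total_count + 1])
  -- (waysTab …).getD 0: none means Python B raised IndexError there (outside Pre_)
  (bounds.zip bounds.tail).foldl (fun r pq => r * (waysTab (pq.2 - pq.1 - 1)).getD 0) 1

-- ===== PRECONDITION & SPEC =====
-- Pre_ excludes exactly the inputs on which A raises RecursionError: some gap between
-- consecutive boundaries (0, the fixed seats, total_count) is negative, i.e. the
-- sequence 0, fixed_seat_array…, total_count+1 is not strictly increasing.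
def Pre_get_all_ways_of_theater_seat (total_count : Int) (fixed_seat_array : List Int) : Prop :=
  List.IsChain (· < ·) (0 :: (fixed_seat_array ++ [total_count + 1]))
instance (total_count : Int) (fixed_seat_array : List Int) : Decidable (Pre_get_all_ways_of_theater_seat total_count fixed_seat_array) := by unfold Pre_get_all_ways_of_theater_seat; infer_instance

def pvWitness_get_all_ways_of_theater_seat : Int × List Int := (9, [2, 5, 6])

def Spec_get_all_ways_of_theater_seat (total_count : Int) (fixed_seat_array : List Int) (out : Int) : Prop := out = get_all_ways_of_theater_seat_alt total_count fixed_seat_array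
instance (total_count : Int) (fixed_seat_array : List Int) (out : Int) : Decidable (Spec_get_all_ways_of_theater_seat total_count fixed_seat_array out) := by unfold Spec_get_all_ways_of_theater_seat; infer_instance

-- ===== CLAIM (what is proved, stated in full; the proofs are below) =====
def Claim_equal_get_all_ways_of_theater_seat : Prop := ∀ (total_count : Int) (fixed_seat_array : List Int), Dom_get_all_ways_of_theater_seat total_count fixed_seat_array → Pre_get_all_ways_of_theater_seat total_count fixed_seat_array → Spec_get_all_ways_of_theater_seat total_count fixed_seat_array (get_all_ways_of_theater_seat total_count fixed_seat_array)

-- ===== LEMMAS AND PROOFS =====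

-- the mathematical count: fib 0 = fib 1 = 1, fib 2 = 2, …
def fib : Nat → Int
  | 0 => 1
  | 1 => 1
  | n + 2 => fib (n + 1) + fib n

lemma fib_rec (n : Int) (h : 2 ≤ n) :
    fib (n - 1).toNat + fib (n - 2).toNat = fib n.toNat := by
  have h1 : (n - 1).toNat = (n - 2).toNat + 1 := by omega
  have h2 : n.toNat = (n - 2).toNat + 2 := by omega
  rw [h1, h2, fib]

-- memo invariant: every entry is correct, and the keys 0 and 1 are present
def goodMemo (m : PySem.Dict Int Int) : Prop :=
  (∀ k v, m.get? k = some v → 0 ≤ k ∧ v = fib k.toNat) ∧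
    m.get? 0 = some 1 ∧ m.get? 1 = some 1

lemma goodMemo_init : goodMemo initMemo := by
  refine ⟨?_, by decide, by decide⟩
  intro k v h
  have hval : initMemo.get? k
      = if k = 2 then some 2 else if k = 1 then some 1 else if k = 0 then some 1 else none := by
    simp [initMemo, PySem.Dict.get?_insert, PySem.Dict.get?_empty]
  rw [hval] at h
  split_ifs at h with h2 h1 h0 <;> simp only [Option.some.injEq] at h
  · subst h2; exact ⟨by omega, by rw [← h]; decide⟩
  · subst h1; exact ⟨by omega, by rw [← h]; decide⟩
  · subst h0; exact ⟨by omega, by rw [← h]; decide⟩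

lemma getCount_ok : ∀ (fuel : Nat) (m : PySem.Dict Int Int) (n : Int),
    goodMemo m → 0 ≤ n → n.toNat < fuel →
    ∃ m', getCountFuel fuel m n = some (fib n.toNat, m') ∧ goodMemo m' := by
  intro fuel
  induction fuel with
  | zero => intro m n _ _ h; omega
  | succ fuel ih =>
    intro m n hm hn hfuel
    rcases hm with ⟨hcorr, h0, h1⟩
    match hhit : m.get? n with
    | some v =>
      obtain ⟨_, rfl⟩ := hcorr n v hhit
      exact ⟨m, by simp [getCountFuel, hhit], ⟨hcorr, h0, h1⟩⟩
    | none =>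
      -- n is not in the memo, yet 0 and 1 are, so n ≥ 2 (n ≥ 0 is given)
      have hn2 : 2 ≤ n := by
        rcases lt_trichotomy n 2 with h | h | h
        · interval_cases n <;> simp_all
        · omega
        · omega
      obtain ⟨m1, e1, hm1⟩ := ih m (n - 1) ⟨hcorr, h0, h1⟩ (by omega) (by omega)
      obtain ⟨m2, e2, hm2⟩ := ih m1 (n - 2) hm1 (by omega) (by omega)
      refine ⟨m2.insert n (fib (n - 1).toNat + fib (n - 2).toNat), ?_, ?_⟩
      · simp only [getCountFuel, hhit, e1, e2]
        rw [fib_rec n hn2]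
      · rcases hm2 with ⟨hc2, g0, g1⟩
        refine ⟨?_, ?_, ?_⟩
        · intro k v h
          rw [PySem.Dict.get?_insert] at h
          split_ifs at h with hk
          · subst hk
            simp only [Option.some.injEq] at h
            exact ⟨by omega, by rw [← h, fib_rec k hn2]⟩
          · exact hc2 k v h
        · rw [PySem.Dict.get?_insert]; split_ifs with h <;> [omega; exact g0]
        · rw [PySem.Dict.get?_insert]; split_ifs with h <;> [omega; exact g1]

-- abstract value of A's loop: product of per-gap counts, and the final current index
def prodFib : Int → List Int → Int
  | _, [] => 1
  | c, i :: rest => fib (i - 1 - c).toNat * prodFib i rest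

def lastCur : Int → List Int → Int
  | c, [] => c
  | _, i :: rest => lastCur i rest

lemma aLoop_eq : ∀ (l : List Int) (c result : Int) (m : PySem.Dict Int Int),
    goodMemo m → List.IsChain (· < ·) (c :: l) →
    ∃ m', aLoop l (result, c, m) = some (result * prodFib c l, lastCur c l, m') ∧ goodMemo m' := by
  intro l
  induction l with
  | nil => intro c result m hm _; exact ⟨m, by simp [aLoop, prodFib, lastCur], hm⟩
  | cons i rest ih =>
    intro c result m hm hch
    rcases List.isChain_cons_cons.mp hch with ⟨hlt, hch'⟩
    obtain ⟨m1, e1, hm1⟩ := getCount_ok ((i - 1 - c).toNat + 1) m (i - 1 - c) hm (by omega) (by omega)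
    obtain ⟨m2, e2, hm2⟩ := ih i (result * fib (i - 1 - c).toNat) m1 hm1 hch'
    refine ⟨m2, ?_, hm2⟩
    simp only [aLoop, e1]
    have h : i - 1 + 1 = i := by ring
    rw [h, e2, prodFib, lastCur]
    ring_nf

-- B's fibs table after k loop iterations is [fib 0, …, fib (k+1)]
def tabStep (fibs : List Int) (_ : Int) : List Int :=
  fibs ++ [(PySem.List.pyGet? fibs (-1)).getD 0 + (PySem.List.pyGet? fibs (-2)).getD 0]

lemma tabStep_eq (k : Nat) :
    tabStep ((List.range (k + 2)).map fib) 0 = (List.range (k + 3)).map fib := by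
  have hlen : ((List.range (k + 2)).map fib).length = k + 2 := by simp
  have h1 : PySem.List.pyGet? ((List.range (k + 2)).map fib) (-1)
      = some (fib (k + 1)) := by
    rw [PySem.List.pyGet?_neg_ofNat _ 1 (by omega) (by omega), hlen]
    simp
  have h2 : PySem.List.pyGet? ((List.range (k + 2)).map fib) (-2)
      = some (fib k) := by
    rw [PySem.List.pyGet?_neg_ofNat _ 2 (by omega) (by omega), hlen]
    simp
  unfold tabStep
  rw [h1, h2]
  have h3 : List.range (k + 3) = List.range (k + 2) ++ [k + 2] := List.range_succ
  rw [h3, List.map_append]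
  simp only [List.map_cons, List.map_nil, Option.getD_some]
  have h4 : fib (k + 1) + fib k = fib (k + 2) := by rw [fib]
  rw [h4]

lemma tabFold : ∀ (l : List Int) (k : Nat),
    l.foldl tabStep ((List.range (k + 2)).map fib)
      = (List.range (l.length + (k + 2))).map fib := by
  intro l
  induction l with
  | nil => intro k; simp
  | cons x xs ih =>
    intro k
    simp only [List.foldl_cons, List.length_cons]
    have h : tabStep ((List.range (k + 2)).map fib) x = (List.range (k + 3)).map fib := by
      rw [show tabStep ((List.range (k + 2)).map fib) x
            = tabStep ((List.range (k + 2)).map fib) 0 from rfl, tabStep_eq]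
    rw [h, ih (k + 1)]
    have h2 : xs.length + (k + 1 + 2) = xs.length + 1 + (k + 2) := by omega
    rw [h2]

lemma waysTab_eq (n : Int) (hn : 0 ≤ n) : waysTab n = some (fib n.toNat) := by
  unfold waysTab
  have h0 : ([1, 1] : List Int) = (List.range (0 + 2)).map fib := by decide
  have hfold : (PySem.List.pyRange 0 (n - 1) 1).foldl
      (fun (fibs : List Int) _ =>
        fibs ++ [(PySem.List.pyGet? fibs (-1)).getD 0 + (PySem.List.pyGet? fibs (-2)).getD 0])
      [1, 1]
      = (List.range ((PySem.List.pyRange 0 (n - 1) 1).length + (0 + 2))).map fib := by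
    rw [h0]
    exact tabFold (PySem.List.pyRange 0 (n - 1) 1) 0
  simp only [hfold, PySem.List.length_pyRange_one]
  rw [PySem.List.pyGet?_of_nonneg _ hn]
  simp only [List.getElem?_map]
  rw [List.getElem?_range (by omega)]
  simp

-- B's fold equals the same product of fib gaps
lemma bFold_eq : ∀ (l : List Int) (c r tc : Int),
    List.IsChain (· < ·) (c :: (l ++ [tc + 1])) →
    ((c :: (l ++ [tc + 1])).zip (l ++ [tc + 1])).foldl
        (fun r pq => r * (waysTab (pq.2 - pq.1 - 1)).getD 0) r
      = r * (prodFib c l * fib (tc - lastCur c l).toNat) := by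
  intro l
  induction l with
  | nil =>
    intro c r tc hch
    have hlt : c < tc + 1 := (List.isChain_cons_cons.mp hch).1
    simp only [List.nil_append, List.zip_cons_cons, List.zip_nil_right, List.foldl_cons,
      List.foldl_nil, prodFib, lastCur]
    rw [waysTab_eq _ (by omega)]
    have h : tc + 1 - c - 1 = tc - c := by ring
    rw [h]
    simp only [Option.getD_some]
    ring
  | cons i rest ih =>
    intro c r tc hch
    rcases List.isChain_cons_cons.mp hch with ⟨hlt, hch'⟩
    simp only [List.cons_append, List.zip_cons_cons, List.foldl_cons]
    rw [waysTab_eq _ (by omega)]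
    simp only [Option.getD_some]
    rw [ih i (r * fib (i - c - 1).toNat) tc hch']
    simp only [prodFib, lastCur]
    have h : i - 1 - c = i - c - 1 := by ring
    rw [h]; ring

lemma alt_eq (tc : Int) (l : List Int)
    (hch : List.IsChain (· < ·) (0 :: (l ++ [tc + 1]))) :
    get_all_ways_of_theater_seat_alt tc l = prodFib 0 l * fib (tc - lastCur 0 l).toNat := by
  unfold get_all_ways_of_theater_seat_alt
  simp only [List.tail_cons]
  rw [bFold_eq l 0 1 tc hch]
  ring

-- the chain gives lastCur < tc + 1, and restricts to the seat list alone
lemma lastCur_lt : ∀ (l : List Int) (c tc : Int),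
    List.IsChain (· < ·) (c :: (l ++ [tc + 1])) → lastCur c l < tc + 1 := by
  intro l
  induction l with
  | nil => intro c tc h; simpa [lastCur] using (List.isChain_cons_cons.mp h).1
  | cons i rest ih =>
    intro c tc h
    exact ih i tc (List.isChain_cons_cons.mp h).2

lemma chain_dropLast : ∀ (l : List Int) (c tc : Int),
    List.IsChain (· < ·) (c :: (l ++ [tc + 1])) → List.IsChain (· < ·) (c :: l) := by
  intro l
  induction l with
  | nil => intro c tc _; simp
  | cons i rest ih =>
    intro c tc h
    rcases List.isChain_cons_cons.mp h with ⟨h1, h2⟩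
    exact List.isChain_cons_cons.mpr ⟨h1, ih i tc h2⟩

-- ===== VERDICT (by name: the statement is the Claim_ definition above) =====
theorem get_all_ways_of_theater_seat_spec : Claim_equal_get_all_ways_of_theater_seat := by
  intro tc l _ hpre
  unfold Spec_get_all_ways_of_theater_seat
  have hch : List.IsChain (· < ·) (0 :: (l ++ [tc + 1])) := hpre
  obtain ⟨m1, e1, hm1⟩ := aLoop_eq l 0 1 initMemo goodMemo_init (chain_dropLast l 0 tc hch)
  have hlast := lastCur_lt l 0 tc hch
  obtain ⟨m2, e2, _⟩ := getCount_ok ((tc - lastCur 0 l).toNat + 1) m1 (tc - lastCur 0 l) hm1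
    (by omega) (by omega)
  unfold get_all_ways_of_theater_seat
  rw [e1]
  dsimp only
  rw [e2]
  dsimp only
  rw [alt_eq tc l hch]
  ring
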